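-- pv_equiv track=rewrite | github.com/mortyc126-debug/SHA | nk_dir8_carry_free.py | sha_with_carries
-- ===== SOURCE A (Python) =====
-- MASK32 = 0xFFFFFFFF
--
-- K=[0x428a2f98,0x71374491,0xb5c0fbcf,0xe9b5dba5,0x3956c25b,0x59f111f1,0x923f82a4,0xab1c5ed5,0xd807aa98,0x12835b01,0x243185be,0x550c7dc3,0x72be5d74,0x80deb1fe,0x9bdc06a7,0xc19bf174,0xe49b69c1,0xefbe4786,0x0fc19dc6,0x240ca1cc,0x2de92c6f,0x4a7484aa,0x5cb0a9dc,0x76f988da,0x983e5152,0xa831c66d,0xb00327c8,0xbf597fc7,0xc6e00bf3,0xd5a79147,0x06ca6351,0x14292967,0x27b70a85,0x2e1b2138,0x4d2c6dfc,0x53380d13,0x650a7354,0x766a0abb,0x81c2c92e,0x92722c85,0xa2bfe8a1,0xa81a664b,0xc24b8b70,0xc76c51a3,0xd192e819,0xd6990624,0xf40e3585,0x106aa070,0x19a4c116,0x1e376c08,0x2748774c,0x34b0bcb5,0x391c0cb3,0x4ed8aa4a,0x5b9cca4f,0x682e6ff3,0x748f82ee,0x78a5636f,0x84c87814,0x8c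c70208,0x90befffa,0xa4506ceb,0xbef9a3f7,0xc67178f2]
--
-- IV=[0x6a09e667,0xbb67ae85,0x3c6ef372,0xa54ff53a,0x510e527f,0x9b05688c,0x1f83d9ab,0x5be0cd19]
--
-- def rotr(x,n): return ((x>>n)|(x<<(32-n)))&MASK32
--
-- def ssig0(x): return rotr(x,7)^rotr(x,18)^(x>>3)
--
-- def ssig1(x): return rotr(x,17)^rotr(x,19)^(x>>10)
--
-- def sig0(x): return rotr(x,2)^rotr(x,13)^rotr(x,22)
--
-- def sig1(x): return rotr(x,6)^rotr(x,11)^rotr(x,25)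
--
-- def ch(e,f,g): return (e&f)^(~e&g)&MASK32
--
-- def maj(a,b,c): return (a&b)^(a&c)^(b&c)
--
-- def compute_carries(a, b):
--     """Compute 32-bit carry vector for a + b."""
--     c = 0
--     carries = 0
--     for k in range(32):
--         ak = (a >> k) & 1
--         bk = (b >> k) & 1
--         c_new = (ak & bk) | (ak & c) | (bk & c)
--         carries |= (c_new << k)
--         c = c_new
--     return carries
--
-- def sha_with_carries(M):
--     """Run SHA-256, return state trace AND carry vectors for each addition."""
--     W = list(M) + [0]*(64-len(M))
--     for i in range(16, 64):
--         W[i] = (ssig1(W[i-2]) + W[i-7] + ssig0(W[i-15]) + W[i-16]) & MASK32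
--
--     a, b, c, d, e, f, g, h = IV
--     all_carries = []  # list of carry vectors per round
--
--     for r in range(64):
--         sig1_e = sig1(e)
--         ch_efg = ch(e, f, g)
--
--         # T1 = h + sig1(e) + ch(e,f,g) + K[r] + W[r]
--         # 4 additions in sequence
--         t1_1 = h; t1_2 = sig1_e
--         c1 = compute_carries(t1_1, t1_2)
--         sum1 = (t1_1 + t1_2) & MASK32
--
--         c2 = compute_carries(sum1, ch_efg)
--         sum2 = (sum1 + ch_efg) & MASK32
--
--         c3 = compute_carries(sum2, K[r])
--         sum3 = (sum2 + K[r]) & MASK32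
--
--         c4 = compute_carries(sum3, W[r])
--         T1 = (sum3 + W[r]) & MASK32
--
--         # T2 = sig0(a) + maj(a,b,c)
--         sig0_a = sig0(a)
--         maj_abc = maj(a, b, c)
--         c5 = compute_carries(sig0_a, maj_abc)
--         T2 = (sig0_a + maj_abc) & MASK32
--
--         # e_new = d + T1
--         c6 = compute_carries(d, T1)
--         e_new = (d + T1) & MASK32
--
--         # a_new = T1 + T2
--         c7 = compute_carries(T1, T2)
--         a_new = (T1 + T2) & MASK32
--
--         all_carries.append((c1, c2, c3, c4, c5, c6, c7))
--
--         h, g, f = g, f, e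
--         e = e_new
--         d, c, b = c, b, a
--         a = a_new
--
--     H = tuple((s+iv)&MASK32 for s,iv in zip([a,b,c,d,e,f,g,h], IV))
--     return H, all_carries
-- ===== SOURCE B (Python) =====
-- MASK32 = 0xFFFFFFFF
--
-- K=[0x428a2f98,0x71374491,0xb5c0fbcf,0xe9b5dba5,0x3956c25b,0x59f111f1,0x923f82a4,0xab1c5ed5,0xd807aa98,0x12835b01,0x243185be,0x550c7dc3,0x72be5d74,0x80deb1fe,0x9bdc06a7,0xc19bf174,0xe49b69c1,0xefbe4786,0x0fc19dc6,0x240ca1cc,0x2de92c6f,0x4a7484aa,0x5cb0a9dc,0x76f988da,0x983e5152,0xa831c66d,0xb00327c8,0xbf597fc7,0xc6e00bf3,0xd5a79147,0x06ca6351,0x14292967,0x27b70a85,0x2e1b2138,0x4d2c6dfc,0x53380d13,0x650a7354,0x766a0abb,0x81c2c92e,0x92722c85,0xa2bfe8a1,0xa81a664b,0xc24b8b70,0xc76c51a3,0xd192e819,0xd6990624,0xf40e3585,0x106aa070,0x19a4c116,0x1e376c08,0x2748774c,0x34b0bcb5,0x391c0cb3,0x4ed8aa4a,0x5b9cca4f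,0x682e6ff3,0x748f82ee,0x78a5636f,0x84c87814,0x8cc70208,0x90befffa,0xa4506ceb,0xbef9a3f7,0xc67178f2]
--
-- IV=[0x6a09e667,0xbb67ae85,0x3c6ef372,0xa54ff53a,0x510e527f,0x9b05688c,0x1f83d9ab,0x5be0cd19]
--
-- def rotr(x, n): return ((x >> n) | (x << (32 - n))) & MASK32
--
-- def ssig0(x): return rotr(x, 7) ^ rotr(x, 18) ^ (x >> 3)
--
-- def ssig1(x): return rotr(x, 17) ^ rotr(x, 19) ^ (x >> 10)
--
-- def sig0(x): return rotr(x, 2) ^ rotr(x, 13) ^ rotr(x, 22)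
--
-- def sig1(x): return rotr(x, 6) ^ rotr(x, 11) ^ rotr(x, 25)
--
-- def ch(e, f, g): return (e & f) ^ (~e & g) & MASK32
--
-- def maj(a, b, c): return (a & b) ^ (a & c) ^ (b & c)
--
-- def add32(x, y):
--     """32-bit add; carry vector from the identity x+y = x^y^(carries<<1) (no bit loop)."""
--     s = x + y
--     return s & MASK32, ((s ^ x ^ y) >> 1) & MASK32
--
-- def _round(st, k, w):
--     a, b, c, d, e, f, g, h = st
--     s1, c1 = add32(h, sig1(e))
--     s2, c2 = add32(s1, ch(e, f, g))
--     s3, c3 = add32(s2, k)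
--     t1, c4 = add32(s3, w)
--     t2, c5 = add32(sig0(a), maj(a, b, c))
--     e_new, c6 = add32(d, t1)
--     a_new, c7 = add32(t1, t2)
--     return (a_new, a, b, c, e_new, e, f, g), (c1, c2, c3, c4, c5, c6, c7)
--
-- def sha_with_carries(M):
--     """Run SHA-256, return state trace AND carry vectors for each addition."""
--     w = (list(M) + [0] * 16)[:16]
--     for i in range(16, 64):
--         w.append((ssig1(w[i - 2]) + w[i - 7] + ssig0(w[i - 15]) + w[i - 16]) & MASK32)
--
--     st = tuple(IV)
--     all_carries = []
--     for r in range(64):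
--         st, cs = _round(st, K[r], w[r])
--         all_carries.append(cs)
--
--     return tuple((s + iv) & MASK32 for s, iv in zip(st, IV)), all_carries
-- ===== Notes on version B (the rewrite author's own statement) =====
-- stated objective: alternative
-- what changed: A computes each addition's carry vector with a 32-iteration per-bit loop; B gets it in closed form from the identity x+y = x^y^(carries<<1) (carries = ((x+y)^x^y)>>1 masked to 32 bits), and restructures the message schedule (append-built) and round function (tuple-state helper returning the seven carries).
import Mathlib
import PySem

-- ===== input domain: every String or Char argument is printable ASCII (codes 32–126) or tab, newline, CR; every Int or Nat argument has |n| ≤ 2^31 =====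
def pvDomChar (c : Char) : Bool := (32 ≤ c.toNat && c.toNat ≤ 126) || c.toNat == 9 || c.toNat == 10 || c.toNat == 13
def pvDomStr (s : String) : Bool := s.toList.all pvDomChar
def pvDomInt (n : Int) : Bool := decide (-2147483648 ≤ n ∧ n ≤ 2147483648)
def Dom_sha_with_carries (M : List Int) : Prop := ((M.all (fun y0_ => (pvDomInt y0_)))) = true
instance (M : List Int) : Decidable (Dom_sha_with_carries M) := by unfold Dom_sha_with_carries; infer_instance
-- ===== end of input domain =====

-- B replaces A's 32-iteration per-addition carry loop by the closed-form identity x+y = x^y^(carries<<1)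
-- and restructures the round/schedule loops; equivalence of the return value is proved for all inputs.

def pvMASK32 : Int := 4294967295

def pvK : List Int := [0x428a2f98,0x71374491,0xb5c0fbcf,0xe9b5dba5,0x3956c25b,0x59f111f1,0x923f82a4,0xab1c5ed5,0xd807aa98,0x12835b01,0x243185be,0x550c7dc3,0x72be5d74,0x80deb1fe,0x9bdc06a7,0xc19bf174,0xe49b69c1,0xefbe4786,0x0fc19dc6,0x240ca1cc,0x2de92c6f,0x4a7484aa,0x5cb0a9dc,0x76f988da,0x983e5152,0xa831c66d,0xb00327c8,0xbf597fc7,0xc6e00bf3,0xd5a79147,0x06ca6351,0x14292967,0x27b70a85,0x2e1b2138,0x4d2c6dfc,0x53380d13,0x650a7354,0x766a0abb,0x81c2c92e,0x92722c85,0xa2bfe8a1,0xa81a664b,0xc24b8b70,0xc76c51a3,0xd192e819,0xd6990624,0xf40e3585,0x106aa070,0x19a4c116,0x1e376c08,0x2748774c,0x34b0bcb5,0x391c0cb3,0x4ed8aa4a,0x5b9cca4f,0x682e6ff3,0x748f82ee,0x78a5636f,0x84c87814,0x8cc70208,0x90befffa,0xa4506ceb,0xbef9a3f7,0xc67178f2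]

def pvIV : List Int := [0x6a09e667,0xbb67ae85,0x3c6ef372,0xa54ff53a,0x510e527f,0x9b05688c,0x1f83d9ab,0x5be0cd19]

-- bit helpers shared verbatim by Source A and Source B (rotr/ssig0/ssig1/sig0/sig1/ch/maj)
def pvRotr (x : Int) (n : Nat) : Int :=
  PySem.Int.band (PySem.Int.bor (x >>> n) (x <<< (32 - n))) pvMASK32

def pvSsig0 (x : Int) : Int := PySem.Int.bxor (PySem.Int.bxor (pvRotr x 7) (pvRotr x 18)) (x >>> (3:Nat))
def pvSsig1 (x : Int) : Int := PySem.Int.bxor (PySem.Int.bxor (pvRotr x 17) (pvRotr x 19)) (x >>> (10:Nat))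
def pvSig0 (x : Int) : Int := PySem.Int.bxor (PySem.Int.bxor (pvRotr x 2) (pvRotr x 13)) (pvRotr x 22)
def pvSig1 (x : Int) : Int := PySem.Int.bxor (PySem.Int.bxor (pvRotr x 6) (pvRotr x 11)) (pvRotr x 25)
def pvCh (e f g : Int) : Int := PySem.Int.bxor (PySem.Int.band e f) (PySem.Int.band (PySem.Int.band (Int.not e) g) pvMASK32)
def pvMaj (a b c : Int) : Int := PySem.Int.bxor (PySem.Int.bxor (PySem.Int.band a b) (PySem.Int.band a c)) (PySem.Int.band b c)

def pvState := Int × Int × Int × Int × Int × Int × Int × Int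

-- a,b,...,h = IV  (identical in both sources)
def pvInit : pvState := (0x6a09e667,0xbb67ae85,0x3c6ef372,0xa54ff53a,0x510e527f,0x9b05688c,0x1f83d9ab,0x5be0cd19)

-- H = tuple((s+iv)&MASK32 for s,iv in zip([a..h], IV))  (identical in both sources)
def pvFinish (res : pvState × List (List Int)) : List Int × List (List Int) :=
  let (a, b, c, d, e, f, g, h) := res.1
  ((List.zip [a, b, c, d, e, f, g, h] pvIV).map (fun p => PySem.Int.band (p.1 + p.2) pvMASK32), res.2)

-- ===== PORT A =====
-- loop body of A's compute_carries (state: carry c, accumulated carries)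
def pvCarryStep (a b : Int) (st : Int × Int) (k : Nat) : Int × Int :=
  let ak := PySem.Int.band (a >>> k) 1
  let bk := PySem.Int.band (b >>> k) 1
  let cn := PySem.Int.bor (PySem.Int.bor (PySem.Int.band ak bk) (PySem.Int.band ak st.1)) (PySem.Int.band bk st.1)
  (cn, PySem.Int.bor st.2 (cn <<< k))

def pvComputeCarries (a b : Int) : Int :=
  ((List.range 32).foldl (pvCarryStep a b) (0, 0)).2

-- A: W = list(M) + [0]*(64-len(M)); then W[i] assigned in place for i in 16..63
def pvScheduleA (M : List Int) : List Int :=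
  (List.range 48).foldl (fun W j =>
    let i := 16 + j
    W.set i (PySem.Int.band (pvSsig1 (W.getD (i-2) 0) + W.getD (i-7) 0 + pvSsig0 (W.getD (i-15) 0) + W.getD (i-16) 0) pvMASK32))
    (M ++ List.replicate (Int.toNat (64 - (M.length : Int))) 0)

-- A's round body: eight scalars, seven compute_carries calls, tuple appended
def pvRoundA (W : List Int) (st : pvState × List (List Int)) (r : Nat) : pvState × List (List Int) :=
  let (a, b, c, d, e, f, g, h) := st.1
  let sig1_e := pvSig1 e
  let ch_efg := pvCh e f g
  let t1_1 := h
  let t1_2 := sig1_e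
  let c1 := pvComputeCarries t1_1 t1_2
  let sum1 := PySem.Int.band (t1_1 + t1_2) pvMASK32
  let c2 := pvComputeCarries sum1 ch_efg
  let sum2 := PySem.Int.band (sum1 + ch_efg) pvMASK32
  let c3 := pvComputeCarries sum2 (pvK.getD r 0)
  let sum3 := PySem.Int.band (sum2 + pvK.getD r 0) pvMASK32
  let c4 := pvComputeCarries sum3 (W.getD r 0)
  let T1 := PySem.Int.band (sum3 + W.getD r 0) pvMASK32
  let sig0_a := pvSig0 a
  let maj_abc := pvMaj a b c
  let c5 := pvComputeCarries sig0_a maj_abc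
  let T2 := PySem.Int.band (sig0_a + maj_abc) pvMASK32
  let c6 := pvComputeCarries d T1
  let e_new := PySem.Int.band (d + T1) pvMASK32
  let c7 := pvComputeCarries T1 T2
  let a_new := PySem.Int.band (T1 + T2) pvMASK32
  ((a_new, a, b, c, e_new, e, f, g), st.2 ++ [[c1, c2, c3, c4, c5, c6, c7]])

def sha_with_carries (M : List Int) : List Int × List (List Int) :=
  pvFinish ((List.range 64).foldl (pvRoundA (pvScheduleA M)) (pvInit, []))

-- ===== PORT B =====
-- B's add32: 32-bit sum and its carry vector, closed form from x+y = x^y^(carries<<1)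
def pvAdd32 (x y : Int) : Int × Int :=
  let s := x + y
  (PySem.Int.band s pvMASK32, PySem.Int.band ((PySem.Int.bxor (PySem.Int.bxor s x) y) >>> (1:Nat)) pvMASK32)

-- B: w = (list(M)+[0]*16)[:16]; schedule grown by appending
def pvScheduleB (M : List Int) : List Int :=
  (List.range 48).foldl (fun w j =>
    let i := 16 + j
    w ++ [PySem.Int.band (pvSsig1 (w.getD (i-2) 0) + w.getD (i-7) 0 + pvSsig0 (w.getD (i-15) 0) + w.getD (i-16) 0) pvMASK32])
    ((M ++ List.replicate 16 0).take 16)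

-- B's _round: state in, (new state, seven carries) out, all additions through add32
def pvRoundB (st : pvState) (k w : Int) : pvState × List Int :=
  let (a, b, c, d, e, f, g, h) := st
  let (s1, c1) := pvAdd32 h (pvSig1 e)
  let (s2, c2) := pvAdd32 s1 (pvCh e f g)
  let (s3, c3) := pvAdd32 s2 k
  let (t1, c4) := pvAdd32 s3 w
  let (t2, c5) := pvAdd32 (pvSig0 a) (pvMaj a b c)
  let (e_new, c6) := pvAdd32 d t1
  let (a_new, c7) := pvAdd32 t1 t2
  ((a_new, a, b, c, e_new, e, f, g), [c1, c2, c3, c4, c5, c6, c7])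

def pvStepB (w : List Int) (p : pvState × List (List Int)) (r : Nat) : pvState × List (List Int) :=
  let q := pvRoundB p.1 (pvK.getD r 0) (w.getD r 0)
  (q.1, p.2 ++ [q.2])

def sha_with_carries_alt (M : List Int) : List Int × List (List Int) :=
  pvFinish ((List.range 64).foldl (pvStepB (pvScheduleB M)) (pvInit, []))

-- ===== PRECONDITION & SPEC =====
def Spec_sha_with_carries (M : List Int) (out : List Int × List (List Int)) : Prop := out = sha_with_carries_alt M
instance (M : List Int) (out : List Int × List (List Int)) : Decidable (Spec_sha_with_carries M out) := by unfold Spec_sha_with_carries; infer_instance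

-- ===== CLAIM (what is proved, stated in full; the proofs are below) =====
def Claim_equal_sha_with_carries : Prop := ∀ (M : List Int), Dom_sha_with_carries M → Spec_sha_with_carries M (sha_with_carries M)

-- ===== LEMMAS AND PROOFS =====

-- carry into bit j when adding a and b
def pvCin (a b : Int) (j : Nat) : Int := if 2^j ≤ a % 2^j + b % 2^j then 1 else 0

lemma pv_cin01 (a b : Int) (j : Nat) : pvCin a b j = 0 ∨ pvCin a b j = 1 := by
  unfold pvCin; split_ifs <;> simp

lemma pv_bxor_eq (x y : Int) : PySem.Int.bxor x y = Int.xor x y := by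
  unfold PySem.Int.bxor
  cases x with
  | ofNat m => cases y with
    | ofNat n => simp [Int.xor]
    | negSucc n => simp only [Int.xor]; norm_num [Int.negSucc_eq]; rw [if_neg (by omega)]; ring
  | negSucc m => cases y with
    | ofNat n => simp only [Int.xor]; norm_num [Int.negSucc_eq]; rw [if_neg (by omega)]; ring
    | negSucc n =>
      simp only [Int.xor]; norm_num [Int.negSucc_eq]
      rw [if_neg (by omega), if_neg (by omega)]

lemma pv_bit_if (x : Int) (j : Nat) : x / 2^j % 2 = if x.testBit j then 1 else 0 := by
  cases x with
  | ofNat m =>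
    have h1 : (Int.ofNat m) / 2^j = Int.ofNat (m / 2^j) := by simp [Int.ofNat_eq_natCast]
    have h2 : Int.ofNat (m / 2^j) % 2 = Int.ofNat (m / 2^j % 2) := by simp [Int.ofNat_eq_natCast]
    rw [h1, h2, Int.testBit, Nat.testBit_eq_decide_div_mod_eq]
    rcases Nat.mod_two_eq_zero_or_one (m / 2^j) with h | h <;> simp [h]
  | negSucc m =>
    have h1 : (Int.negSucc m) / 2^j = Int.negSucc (m / 2^j) := Int.negSucc_ediv m (by positivity)
    rw [h1, Int.testBit, Nat.testBit_eq_decide_div_mod_eq, Int.negSucc_eq]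
    generalize m / 2^j = t
    rcases Nat.mod_two_eq_zero_or_one t with h | h <;> simp [h] <;> omega

lemma pv_bit_eq (x : Int) (k : Nat) : PySem.Int.band (x >>> k) 1 = x / 2^k % 2 := by
  rw [PySem.Int.band_one, PySem.Int.mod_eq_emod_of_pos (by norm_num), Int.shiftRight_eq_div_pow]
  push_cast
  rfl

lemma pv_dec (x : Int) (k : Nat) : x % (2^(k+1) : Int) = x % 2^k + 2^k * (x / 2^k % 2) := by
  have hq : (0:Int) < 2^k := by positivity
  have hdvd : (2^k : Int) ∣ 2^(k+1) := ⟨2, by ring⟩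
  have h1 : x % 2^k = (x % 2^(k+1)) % 2^k := (Int.emod_emod_of_dvd x hdvd).symm
  have h2 : x / 2^k % 2 = (x % 2^(k+1)) / 2^k % 2 := by
    conv_lhs => rw [← Int.emod_add_ediv x (2^(k+1))]
    rw [pow_succ]
    rw [show (2:Int)^k * 2 * (x / (2^k * 2)) = (2 * (x / (2^k*2))) * 2^k by ring]
    rw [Int.add_mul_ediv_right _ _ (ne_of_gt hq), Int.add_mul_emod_self_left]
  set y := x % 2^(k+1) with hy
  have hy0 : 0 ≤ y := Int.emod_nonneg x (by positivity)
  have hy1 : y < 2^(k+1) := Int.emod_lt_of_pos x (by positivity)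
  rw [h1, h2]
  have hdiv01 : y / 2^k = 0 ∨ y / 2^k = 1 := by
    have h0 : 0 ≤ y / 2^k := Int.ediv_nonneg hy0 (le_of_lt hq)
    have h1' : y / 2^k < 2 := by
      rw [Int.ediv_lt_iff_lt_mul hq]
      calc y < 2^(k+1) := hy1
        _ = 2 * 2^k := by ring
    omega
  have := Int.emod_add_ediv y (2^k)
  rcases hdiv01 with h | h <;> rw [h] at this ⊢ <;> omega

lemma pv_sum_div (a b : Int) (j : Nat) : (a + b) / 2^j = a / 2^j + b / 2^j + pvCin a b j := by
  have hq : (0:Int) < 2^j := by positivity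
  have ha := Int.emod_add_ediv a (2^j)
  have hb := Int.emod_add_ediv b (2^j)
  have ha0 : 0 ≤ a % 2^j := Int.emod_nonneg a (ne_of_gt hq)
  have ha1 : a % 2^j < 2^j := Int.emod_lt_of_pos a hq
  have hb0 : 0 ≤ b % 2^j := Int.emod_nonneg b (ne_of_gt hq)
  have hb1 : b % 2^j < 2^j := Int.emod_lt_of_pos b hq
  have hsum : a + b = (a % 2^j + b % 2^j) + (a / 2^j + b / 2^j) * 2^j := by
    rw [add_mul]; linarith [ha, hb]
  rw [hsum, Int.add_mul_ediv_right _ _ (ne_of_gt hq)]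
  unfold pvCin
  split_ifs with h
  · rw [show a % 2^j + b % 2^j = (a % 2^j + b % 2^j - 2^j) + 1 * 2^j by ring,
        Int.add_mul_ediv_right _ _ (ne_of_gt hq),
        Int.ediv_eq_zero_of_lt (by omega) (by omega)]
    ring
  · rw [Int.ediv_eq_zero_of_lt (by omega) (by omega)]
    ring

-- bit j of (a+b)^a^b is the carry into bit j
lemma pv_xbit (a b : Int) (j : Nat) :
    (PySem.Int.bxor (PySem.Int.bxor (a + b) a) b) / 2^j % 2 = pvCin a b j := by
  rw [pv_bxor_eq, pv_bxor_eq, pv_bit_if]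
  rw [Int.testBit_lxor, Int.testBit_lxor]
  have hs := pv_bit_if (a+b) j
  have ha := pv_bit_if a j
  have hb := pv_bit_if b j
  have h2 := pv_sum_div a b j
  rcases pv_cin01 a b j with hc | hc <;> rw [hc] at h2 ⊢ <;>
  · rcases Bool.eq_false_or_eq_true ((a+b).testBit j) with h1 | h1 <;>
    rcases Bool.eq_false_or_eq_true (a.testBit j) with h3 | h3 <;>
    rcases Bool.eq_false_or_eq_true (b.testBit j) with h4 | h4 <;>
    rw [h1] at hs <;> rw [h3] at ha <;> rw [h4] at hb <;>
    simp at hs ha hb <;>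
    rw [h1, h3, h4] <;> (try simp) <;> omega

lemma pv_cin_succ (a b : Int) (k : Nat) :
    pvCin a b (k+1) = if 2 ≤ a / 2^k % 2 + b / 2^k % 2 + pvCin a b k then 1 else 0 := by
  have hq : (0:Int) < 2^k := by positivity
  have ha0 : 0 ≤ a % 2^k := Int.emod_nonneg a (ne_of_gt hq)
  have ha1 : a % 2^k < 2^k := Int.emod_lt_of_pos a hq
  have hb0 : 0 ≤ b % 2^k := Int.emod_nonneg b (ne_of_gt hq)
  have hb1 : b % 2^k < 2^k := Int.emod_lt_of_pos b hq
  have hda := pv_dec a k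
  have hdb := pv_dec b k
  have hak : a / 2^k % 2 = 0 ∨ a / 2^k % 2 = 1 := by omega
  have hbk : b / 2^k % 2 = 0 ∨ b / 2^k % 2 = 1 := by omega
  unfold pvCin
  rw [show ((2:Int)^(k+1)) = 2 * 2^k by ring] at hda hdb ⊢
  rcases hak with h1 | h1 <;> rcases hbk with h2 | h2 <;> rw [h1] at hda ⊢ <;> rw [h2] at hdb ⊢ <;>
    split_ifs with g1 g2 <;> first | rfl | omega

lemma pv_nat_or_pow (k : Nat) : ∀ s, s < 2^k → s ||| 2^k = s + 2^k := by
  induction k with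
  | zero => intro s h; interval_cases s; decide
  | succ k ih =>
    intro s h
    have h2 : s / 2 < 2^k := by omega
    have hdiv : (s ||| 2^(k+1)) / 2 = s/2 + 2^k := by
      rw [Nat.or_div_two, show 2^(k+1)/2 = 2^k by omega]
      exact ih (s/2) h2
    have hp : (2:Nat)^(k+1) % 2 = 0 := by
      have : (2:Nat) ∣ 2^(k+1) := dvd_pow_self 2 (Nat.succ_ne_zero k)
      omega
    have hmod : (s ||| 2^(k+1)) % 2 = s % 2 := by
      have hiff := @Nat.or_mod_two_eq_one s (2^(k+1))
      omega
    omega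

lemma pv_bor_disjoint (S c : Int) (k : Nat) (h0 : 0 ≤ S) (h1 : S < 2^k) (hc : c = 0 ∨ c = 1) :
    PySem.Int.bor S (c <<< k) = S + c * 2^k := by
  rcases hc with h | h <;> subst h
  · have h0' : ((0:Int) <<< k) = 0 := by rw [Int.shiftLeft_eq]; ring
    simp [h0']
  · rw [Int.shiftLeft_eq, one_mul]
    have h2 : S = ((S.toNat : Int)) := (Int.toNat_of_nonneg h0).symm
    rw [h2, show ((2:Int)^k) = ((2^k : Nat) : Int) by push_cast; rfl, PySem.Int.bor_natCast]
    have hlt : S.toNat < 2^k := by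
      have : ((2:Int)^k) = ((2^k : Nat) : Int) := by push_cast; rfl
      omega
    rw [pv_nat_or_pow k S.toNat hlt]
    push_cast; ring

lemma pv_band_mask (x : Int) : PySem.Int.band x 4294967295 = x % 4294967296 := by
  by_cases hx : 0 ≤ x
  · rw [PySem.Int.band_of_nonneg hx (by norm_num)]
    rw [show (4294967295 : Int).toNat = 2^32 - 1 by decide]
    rw [Nat.and_two_pow_sub_one_eq_mod]
    have h1 : x = ((x.toNat : Int)) := (Int.toNat_of_nonneg hx).symm
    rw [h1]
    push_cast
    rfl
  · unfold PySem.Int.band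
    rw [if_neg hx, if_pos (by norm_num)]
    rw [show (4294967295 : Int).toNat = 2^32 - 1 by decide]
    rw [Nat.and_comm, Nat.and_two_pow_sub_one_eq_mod]
    have hmn : ((-x - 1).toNat : Int) = -x - 1 := Int.toNat_of_nonneg (by omega)
    have hmod : ((-x-1).toNat % 2^32 : Nat) ≤ 2^32 - 1 := by
      have := Nat.mod_lt ((-x-1).toNat) (show 0 < 2^32 by norm_num)
      omega
    rw [Int.ofNat_sub hmod]
    have : (((-x - 1).toNat % 2 ^ 32 : Nat) : Int) = (-x-1) % 2^32 := by
      push_cast [hmn]; rfl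
    rw [this]
    have hb : (0:Int) ≤ (-x-1) % 2^32 ∧ (-x-1) % 2^32 < 2^32 :=
      ⟨Int.emod_nonneg _ (by norm_num), Int.emod_lt_of_pos _ (by norm_num)⟩
    have hx32 : x % 4294967296 = 4294967295 - ((-x-1) % 4294967296) := by omega
    norm_num at hx32 ⊢
    omega

lemma pv_fold_inv (a b : Int) (k : Nat) :
    (List.range k).foldl (pvCarryStep a b) (0, 0) =
      (pvCin a b k, (PySem.Int.bxor (PySem.Int.bxor (a + b) a) b) >>> (1:Nat) % 2^k) := by
  induction k with
  | zero => simp [pvCin]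
  | succ k ih =>
    rw [List.range_succ, List.foldl_append, ih]
    set X := PySem.Int.bxor (PySem.Int.bxor (a + b) a) b with hX
    simp only [List.foldl_cons, List.foldl_nil]
    unfold pvCarryStep
    simp only [pv_bit_eq]
    have hq : (0:Int) < 2^k := by positivity
    have hS0 : 0 ≤ X >>> (1:Nat) % 2^k := Int.emod_nonneg _ (ne_of_gt hq)
    have hS1 : X >>> (1:Nat) % 2^k < 2^k := Int.emod_lt_of_pos _ hq
    have hak : a / 2^k % 2 = 0 ∨ a / 2^k % 2 = 1 := by omega
    have hbk : b / 2^k % 2 = 0 ∨ b / 2^k % 2 = 1 := by omega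
    have hyk : X >>> (1:Nat) / 2^k % 2 = pvCin a b (k+1) := by
      have h1 : X >>> (1:Nat) = X / 2 := by
        rw [Int.shiftRight_eq_div_pow]; norm_num
      rw [h1, Int.ediv_ediv_of_nonneg (by norm_num : (0:Int) ≤ 2), show ((2:Int) * 2^k) = 2^(k+1) by ring]
      exact pv_xbit a b (k+1)
    have hdecY := pv_dec (X >>> (1:Nat)) k
    rw [hyk] at hdecY
    have hcn : PySem.Int.bor (PySem.Int.bor (PySem.Int.band (a / 2^k % 2) (b / 2^k % 2))
          (PySem.Int.band (a / 2^k % 2) (pvCin a b k))) (PySem.Int.band (b / 2^k % 2) (pvCin a b k))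
        = pvCin a b (k+1) := by
      rw [pv_cin_succ a b k]
      rcases hak with h1 | h1 <;> rcases hbk with h2 | h2 <;>
        rcases pv_cin01 a b k with h3 | h3 <;> rw [h1, h2, h3] <;> norm_num <;> decide
    rw [hcn]
    refine Prod.ext rfl ?_
    simp only
    rw [pv_bor_disjoint _ _ k hS0 hS1 (pv_cin01 a b (k+1)), hdecY]
    ring

-- A's bit loop equals B's closed-form carry vector
lemma pv_carry_eq (a b : Int) : pvComputeCarries a b = (pvAdd32 a b).2 := by
  simp only [pvComputeCarries, pvAdd32, pvMASK32]
  rw [pv_fold_inv, pv_band_mask]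
  norm_num [show ((2:Int)^32) = 4294967296 by norm_num]

-- the two schedules agree on every index used by the rounds
lemma pv_sched_base (M : List Int) (t : Nat) (ht : t < 16) :
    (M ++ List.replicate (Int.toNat (64 - (M.length : Int))) 0).getD t 0
      = ((M ++ List.replicate 16 0).take 16).getD t 0 := by
  simp only [List.getD_eq_getElem?_getD, List.getElem?_append, List.getElem?_take, List.getElem?_replicate]
  by_cases hM : t < M.length
  · simp [hM, ht]
  · rw [if_neg hM, if_neg hM]
    split_ifs <;> rfl

lemma pv_sched_len (M : List Int) :
    64 ≤ (M ++ List.replicate (Int.toNat (64 - (M.length : Int))) 0).length := by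
  simp [List.length_append, List.length_replicate]
  omega

lemma pv_sched_inv (M : List Int) (n : Nat) (hn : n ≤ 48) :
    let FA := (List.range n).foldl (fun W j =>
      let i := 16 + j
      W.set i (PySem.Int.band (pvSsig1 (W.getD (i-2) 0) + W.getD (i-7) 0 + pvSsig0 (W.getD (i-15) 0) + W.getD (i-16) 0) pvMASK32))
      (M ++ List.replicate (Int.toNat (64 - (M.length : Int))) 0)
    let FB := (List.range n).foldl (fun w j =>
      let i := 16 + j
      w ++ [PySem.Int.band (pvSsig1 (w.getD (i-2) 0) + w.getD (i-7) 0 + pvSsig0 (w.getD (i-15) 0) + w.getD (i-16) 0) pvMASK32])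
      ((M ++ List.replicate 16 0).take 16)
    FA.length = (M ++ List.replicate (Int.toNat (64 - (M.length : Int))) 0).length ∧
    FB.length = 16 + n ∧
    ∀ t, t < 16 + n → FA.getD t 0 = FB.getD t 0 := by
  induction n with
  | zero =>
    refine ⟨rfl, ?_, fun t ht => pv_sched_base M t ht⟩
    simp [List.length_take, List.length_append]
  | succ n ih =>
    have hn' : n ≤ 48 := by omega
    obtain ⟨hA, hB, hEq⟩ := ih hn'
    simp only [List.range_succ, List.foldl_append, List.foldl_cons, List.foldl_nil] at *
    set FA := (List.range n).foldl (fun W j =>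
      let i := 16 + j
      W.set i (PySem.Int.band (pvSsig1 (W.getD (i-2) 0) + W.getD (i-7) 0 + pvSsig0 (W.getD (i-15) 0) + W.getD (i-16) 0) pvMASK32))
      (M ++ List.replicate (Int.toNat (64 - (M.length : Int))) 0) with hFA
    set FB := (List.range n).foldl (fun w j =>
      let i := 16 + j
      w ++ [PySem.Int.band (pvSsig1 (w.getD (i-2) 0) + w.getD (i-7) 0 + pvSsig0 (w.getD (i-15) 0) + w.getD (i-16) 0) pvMASK32])
      ((M ++ List.replicate 16 0).take 16) with hFB
    have hv : PySem.Int.band (pvSsig1 (FA.getD (16+n-2) 0) + FA.getD (16+n-7) 0 + pvSsig0 (FA.getD (16+n-15) 0) + FA.getD (16+n-16) 0) pvMASK32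
            = PySem.Int.band (pvSsig1 (FB.getD (16+n-2) 0) + FB.getD (16+n-7) 0 + pvSsig0 (FB.getD (16+n-15) 0) + FB.getD (16+n-16) 0) pvMASK32 := by
      rw [hEq (16+n-2) (by omega), hEq (16+n-7) (by omega), hEq (16+n-15) (by omega), hEq (16+n-16) (by omega)]
    have hlen64 := pv_sched_len M
    have hiA : 16 + n < FA.length := by omega
    refine ⟨by simp [List.length_set, hA], by simp [hB]; omega, ?_⟩
    intro t ht
    rw [hv]
    set v := PySem.Int.band (pvSsig1 (FB.getD (16+n-2) 0) + FB.getD (16+n-7) 0 + pvSsig0 (FB.getD (16+n-15) 0) + FB.getD (16+n-16) 0) pvMASK32 with hvv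
    simp only [List.getD_eq_getElem?_getD]
    by_cases htn : t = 16 + n
    · subst htn
      have hc : (FB ++ [v])[FB.length]? = some v := List.getElem?_concat_length
      rw [hB] at hc
      rw [List.getElem?_set_self hiA, hc]
    · have ht' : t < 16 + n := by omega
      rw [List.getElem?_set_ne (by omega : 16 + n ≠ t), List.getElem?_append_left (by omega : t < FB.length)]
      have := hEq t ht'
      simp only [List.getD_eq_getElem?_getD] at this
      exact this

lemma pv_sched_eq (M : List Int) (r : Nat) (hr : r < 64) :
    (pvScheduleA M).getD r 0 = (pvScheduleB M).getD r 0 := by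
  have := pv_sched_inv M 48 (le_refl 48)
  exact this.2.2 r (by omega)

-- one round of A equals one round of B (given equal schedule entries)
lemma pv_round_eq (W w : List Int) (r : Nat) (hW : W.getD r 0 = w.getD r 0)
    (st : pvState) (acc : List (List Int)) :
    pvRoundA W (st, acc) r = pvStepB w (st, acc) r := by
  obtain ⟨a, b, c, d, e, f, g, h⟩ := st
  simp only [pvRoundA, pvStepB, pvRoundB, pvAdd32, pv_carry_eq, hW]

lemma pv_loop_eq (W w : List Int) (hW : ∀ r, r < 64 → W.getD r 0 = w.getD r 0) :
    ∀ n, n ≤ 64 → ∀ (s : pvState × List (List Int)),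
      (List.range n).foldl (pvRoundA W) s = (List.range n).foldl (pvStepB w) s := by
  intro n
  induction n with
  | zero => intro _ s; rfl
  | succ n ih =>
    intro hn s
    rw [List.range_succ, List.foldl_append, List.foldl_append, ih (by omega) s]
    simp only [List.foldl_cons, List.foldl_nil]
    obtain ⟨st, acc⟩ := (List.range n).foldl (pvStepB w) s
    exact pv_round_eq W w n (hW n (by omega)) st acc

set_option maxHeartbeats 1000000 in
lemma pv_main (M : List Int) : sha_with_carries M = sha_with_carries_alt M :=
  congrArg pvFinish
    (pv_loop_eq (pvScheduleA M) (pvScheduleB M) (fun r hr => pv_sched_eq M r hr) 64 (le_refl 64)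
      (pvInit, []))

-- ===== VERDICT (by name: the statement is the Claim_ definition above) =====
theorem sha_with_carries_spec : Claim_equal_sha_with_carries := by
  intro M _
  unfold Spec_sha_with_carries
  exact pv_main M
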